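-- pv_equiv track=rewrite | github.com/aleveren/ucsd-research | simple-hier-topic-model/utils.py | _generator_explore_branching_factors
-- ===== SOURCE A (Python) =====
-- def _generator_explore_branching_factors(factors, prefix):
--     yield prefix
--     if len(factors) > 0:
--         first = factors[0]
--         rest = factors[1:]
--         for i in range(first):
--             new_prefix = prefix + (i,)
--             for path in _generator_explore_branching_factors(rest, new_prefix):
--                 yield path
-- ===== SOURCE B (Python) =====
-- def _generator_explore_branching_factors(factors, prefix):
--     # Iterative DFS with an explicit stack instead of recursion.
--     stack = [(factors, prefix)]
--     while stack:
--         fs, pre = stack.pop()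
--         yield pre
--         if fs:
--             rest = fs[1:]
--             # push children in descending i so they pop in ascending order
--             for i in range(fs[0] - 1, -1, -1):
--                 stack.append((rest, pre + (i,)))
-- ===== Notes on version B (the rewrite author's own statement) =====
-- stated objective: alternative
-- what changed: Replaced the recursive generator with an iterative DFS using an explicit stack of (factors, prefix) states, pushing children in reverse so the same preorder is emitted.
import Mathlib
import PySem

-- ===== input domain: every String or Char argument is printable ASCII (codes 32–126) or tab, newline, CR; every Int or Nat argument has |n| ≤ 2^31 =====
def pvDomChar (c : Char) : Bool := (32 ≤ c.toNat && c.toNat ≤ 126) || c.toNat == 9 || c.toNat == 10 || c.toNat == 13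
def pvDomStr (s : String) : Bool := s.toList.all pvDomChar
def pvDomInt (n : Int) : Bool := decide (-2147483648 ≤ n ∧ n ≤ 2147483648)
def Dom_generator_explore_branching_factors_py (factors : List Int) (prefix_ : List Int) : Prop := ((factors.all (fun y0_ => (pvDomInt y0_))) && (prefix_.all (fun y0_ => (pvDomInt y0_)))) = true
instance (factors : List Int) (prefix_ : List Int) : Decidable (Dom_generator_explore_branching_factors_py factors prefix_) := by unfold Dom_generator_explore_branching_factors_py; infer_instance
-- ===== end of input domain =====

-- B replaces the recursive generator with an iterative DFS over an explicit stack
-- (children pushed in descending order so they pop ascending); same preorder, same cost.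
-- Both ports return the list of all yielded paths (the generator, fully consumed).

-- ===== PORT A =====
-- yield prefix; if factors nonempty, for i in range(factors[0]): recurse on factors[1:], prefix+(i,)
def generator_explore_branching_factors_py (factors : List Int) (prefix_ : List Int) : List (List Int) :=
  prefix_ ::
    (match factors with
     | [] => []
     | first :: rest =>
       (PySem.List.pyRange 0 first 1).flatMap (fun i =>
         generator_explore_branching_factors_py rest (prefix_ ++ [i])))

-- ===== PORT B =====
-- size of the whole output tree for one pending state (termination measure only)
def pvTreeSize : List Int → Nat
  | [] => 1
  | f :: rest => 1 + f.toNat * pvTreeSize rest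

def pvStackMeasure (st : List (List Int × List Int)) : Nat :=
  (st.map (fun s => pvTreeSize s.1)).sum

-- measure of the stack after pushing all children (used by the termination proof of pvLoop)
theorem pvMeasure_foldl (l : List Int) (rest : List Int) (pre : List Int)
    (st : List (List Int × List Int)) :
    pvStackMeasure (l.foldl (fun s i => (rest, pre ++ [i]) :: s) st)
      = l.length * pvTreeSize rest + pvStackMeasure st := by
  induction l generalizing st with
  | nil => simp
  | cons x xs ih =>
    simp only [List.foldl_cons, List.length_cons, ih]
    simp [pvStackMeasure]
    ring

-- the while-loop of B: pop a state, emit its prefix, push its children in descending i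
def pvLoop : List (List Int × List Int) → List (List Int)
  | [] => []
  | (fs, pre) :: st =>
    match fs with
    | [] => pre :: pvLoop st
    | first :: rest =>
      pre :: pvLoop ((PySem.List.pyRange (first - 1) (-1) (-1)).foldl
        (fun s i => (rest, pre ++ [i]) :: s) st)
  termination_by st => pvStackMeasure st
  decreasing_by
  · simp [pvStackMeasure, pvTreeSize]
  · rw [pvMeasure_foldl]
    have hlen : (PySem.List.pyRange (first - 1) (-1) (-1)).length ≤ first.toNat := by
      rw [PySem.List.length_pyRange_neg_one]
      omega
    have h2 := Nat.mul_le_mul_right (pvTreeSize rest) hlen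
    simp only [pvStackMeasure, pvTreeSize, List.map_cons, List.sum_cons]
    nlinarith

def generator_explore_branching_factors_py_alt (factors : List Int) (prefix_ : List Int) : List (List Int) :=
  pvLoop [(factors, prefix_)]

-- ===== PRECONDITION & SPEC =====
def Spec_generator_explore_branching_factors_py (factors : List Int) (prefix_ : List Int) (out : List (List Int)) : Prop := out = generator_explore_branching_factors_py_alt factors prefix_
instance (factors : List Int) (prefix_ : List Int) (out : List (List Int)) : Decidable (Spec_generator_explore_branching_factors_py factors prefix_ out) := by unfold Spec_generator_explore_branching_factors_py; infer_instance

-- ===== CLAIM (what is proved, stated in full; the proofs are below) =====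
def Claim_equal_generator_explore_branching_factors_py : Prop := ∀ (factors : List Int) (prefix_ : List Int), Dom_generator_explore_branching_factors_py factors prefix_ → Spec_generator_explore_branching_factors_py factors prefix_ (generator_explore_branching_factors_py factors prefix_)

-- ===== LEMMAS AND PROOFS =====

-- foldl that conses is reverse-map-append
theorem pvFoldl_cons_eq (l : List Int) (rest pre : List Int) (st : List (List Int × List Int)) :
    l.foldl (fun s i => (rest, pre ++ [i]) :: s) st
      = l.reverse.map (fun i => (rest, pre ++ [i])) ++ st := by
  induction l generalizing st with
  | nil => simp
  | cons x xs ih => simp [ih]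

-- the loop invariant: pvLoop processes the stack states in order, each contributing A's output
theorem pvLoop_eq (st : List (List Int × List Int)) :
    pvLoop st = st.flatMap (fun s => generator_explore_branching_factors_py s.1 s.2) := by
  fun_induction pvLoop st with
  | case1 => simp
  | case2 pre st ih =>
    rw [ih]
    simp [generator_explore_branching_factors_py]
  | case3 pre st first rest ih =>
    rw [ih, pvFoldl_cons_eq]
    rw [PySem.List.pyRange_neg_one_eq_reverse]
    simp only [List.reverse_reverse]
    have : (-1 : Int) + 1 = 0 := by norm_num
    rw [this]
    have : first - 1 + 1 = first := by ring
    rw [this]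
    simp [generator_explore_branching_factors_py, List.flatMap_append]
    rw [List.flatMap_map]

-- ===== VERDICT (by name: the statement is the Claim_ definition above) =====
theorem generator_explore_branching_factors_py_spec : Claim_equal_generator_explore_branching_factors_py := by
  intro factors prefix_ _
  unfold Spec_generator_explore_branching_factors_py generator_explore_branching_factors_py_alt
  rw [pvLoop_eq]
  simp
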